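-- pv_equiv track=rewrite | github.com/Tyrrazul/Allianzhilfe-Tool | app.py | get_min_help_seconds
-- ===== SOURCE A (Python) =====
-- def get_min_help_seconds(target_level, help_type):
--     help_table = {
--         "Gebäude": {
--             (1, 6): 60,
--             (7, 7): 180,
--             (8, 8): 300,
--             (9, 11): 600,
--             (12, 14): 1200,
--             (15, 15): 2400,
--             (16, 18): 3600,
--             (19, 20): 5400,
--             (21, 30): 7200
--         },
--         "Ritual": {
--             (1, 6): 60,
--             (7, 7): 180,
--             (8, 8): 300,
--             (9, 11): 600,
--             (12, 14): 1200,
--             (15, 15): 2400,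
--             (16, 18): 3600,
--             (19, 20): 5400,
--             (21, 30): 7200
--         }
--     }
--     table = help_table.get(help_type, help_table["Gebäude"])
--     for level_range, seconds in table.items():
--         if level_range[0] <= target_level <= level_range[1]:
--             return seconds
--     return 60
-- ===== SOURCE B (Python) =====
-- _STARTS = [1, 7, 8, 9, 12, 15, 16, 19, 21]
-- _SECS = [60, 180, 300, 600, 1200, 2400, 3600, 5400, 7200]
--
--
-- def _bisect_right(xs, x):
--     lo, hi = 0, len(xs)
--     while lo < hi:
--         mid = (lo + hi) // 2
--         if x < xs[mid]:
--             hi = mid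
--         else:
--             lo = mid + 1
--     return lo
--
--
-- def get_min_help_seconds(target_level, help_type):
--     if target_level < 1 or target_level > 30:
--         return 60
--     return _SECS[_bisect_right(_STARTS, target_level) - 1]
-- ===== Notes on version B (the rewrite author's own statement) =====
-- stated objective: alternative
-- what changed: Replaces the per-call nested dict literal and linear scan over (lo,hi) ranges with a prebuilt boundary table and a hand-written binary search (bisect_right) over the range start points, after a single in-range guard; the help_type lookup disappears because both tables are identical.
import Mathlib
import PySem

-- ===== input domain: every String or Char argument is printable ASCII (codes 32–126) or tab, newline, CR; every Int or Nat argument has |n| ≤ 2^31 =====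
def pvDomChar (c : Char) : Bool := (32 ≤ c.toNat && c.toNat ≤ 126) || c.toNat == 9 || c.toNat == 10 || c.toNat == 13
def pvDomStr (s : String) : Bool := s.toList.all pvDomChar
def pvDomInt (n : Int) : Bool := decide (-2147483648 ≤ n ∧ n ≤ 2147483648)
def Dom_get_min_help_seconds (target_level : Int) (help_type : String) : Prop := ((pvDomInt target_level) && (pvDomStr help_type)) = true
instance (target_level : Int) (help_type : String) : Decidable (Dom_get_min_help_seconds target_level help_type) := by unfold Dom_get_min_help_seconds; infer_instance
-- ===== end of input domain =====

-- B replaces A's per-call dict literal + linear range scan with a prebuilt boundary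
-- table and a binary search (objective: alternative decomposition, not claimed faster).

-- ===== PORT A =====
-- the inner level-range tables (both dict values are the same literal table)
def pvHelpRanges : List ((Int × Int) × Int) :=
  [((1, 6), 60), ((7, 7), 180), ((8, 8), 300), ((9, 11), 600), ((12, 14), 1200),
   ((15, 15), 2400), ((16, 18), 3600), ((19, 20), 5400), ((21, 30), 7200)]

-- help_table = {"Gebäude": …, "Ritual": …}
def pvHelpTable : PySem.Dict String (List ((Int × Int) × Int)) :=
  (PySem.Dict.empty.insert "Gebäude" pvHelpRanges).insert "Ritual" pvHelpRanges

-- 'for level_range, seconds in table.items(): if lo <= t <= hi: return seconds' / 'return 60'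
def pvScanA (t : Int) : List ((Int × Int) × Int) → Int
  | [] => 60
  | (r, s) :: rest => if r.1 ≤ t ∧ t ≤ r.2 then s else pvScanA t rest

def get_min_help_seconds (target_level : Int) (help_type : String) : Int :=
  let table := pvHelpTable.getD help_type (pvHelpTable.getD "Gebäude" [])
  pvScanA target_level table

-- ===== PORT B =====
def pvStarts : List Int := [1, 7, 8, 9, 12, 15, 16, 19, 21]
def pvSecs : List Int := [60, 180, 300, 600, 1200, 2400, 3600, 5400, 7200]

-- hand-written bisect_right while-loop; fuel bounds the iteration count (hi - lo shrinks each step)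
def pvBisectRight (xs : List Int) (x : Int) : Nat → Nat → Nat → Nat
  | 0, lo, _ => lo
  | fuel + 1, lo, hi =>
    if lo < hi then
      let mid := (lo + hi) / 2
      if x < xs.getD mid 0 then pvBisectRight xs x fuel lo mid
      else pvBisectRight xs x fuel (mid + 1) hi
    else lo

def get_min_help_seconds_alt (target_level : Int) (help_type : String) : Int :=
  if target_level < 1 ∨ target_level > 30 then 60
  else pvSecs.getD (pvBisectRight pvStarts target_level pvStarts.length 0 pvStarts.length - 1) 0

-- ===== PRECONDITION & SPEC =====
def Spec_get_min_help_seconds (target_level : Int) (help_type : String) (out : Int) : Prop := out = get_min_help_seconds_alt target_level help_type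
instance (target_level : Int) (help_type : String) (out : Int) : Decidable (Spec_get_min_help_seconds target_level help_type out) := by unfold Spec_get_min_help_seconds; infer_instance

-- ===== CLAIM (what is proved, stated in full; the proofs are below) =====
def Claim_equal_get_min_help_seconds : Prop := ∀ (target_level : Int) (help_type : String), Dom_get_min_help_seconds target_level help_type → Spec_get_min_help_seconds target_level help_type (get_min_help_seconds target_level help_type)

-- ===== LEMMAS AND PROOFS =====

-- both dict values are the same literal list, so the help_type lookup is the constant pvHelpRanges
theorem pvTable_const (s : String) :
    pvHelpTable.getD s (pvHelpTable.getD "Gebäude" []) = pvHelpRanges := by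
  simp only [pvHelpTable, PySem.Dict.getD, PySem.Dict.get?, PySem.Dict.empty, PySem.Dict.insert]
  cases h1 : ("Gebäude" == s) <;> cases h2 : ("Ritual" == s) <;>
    simp [List.find?, h1, h2]

-- A's scan over the literal table agrees with B's guarded binary search, pointwise
theorem pvScan_eq_alt (t : Int) :
    pvScanA t pvHelpRanges =
      (if t < 1 ∨ t > 30 then 60
       else pvSecs.getD (pvBisectRight pvStarts t pvStarts.length 0 pvStarts.length - 1) 0) := by
  by_cases h : t < 1 ∨ t > 30
  · rw [if_pos h]
    simp only [pvHelpRanges, pvScanA]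
    split_ifs <;> omega
  · rw [if_neg h]
    push Not at h
    obtain ⟨h1, h2⟩ := h
    interval_cases t <;> decide

-- ===== VERDICT (by name: the statement is the Claim_ definition above) =====
theorem get_min_help_seconds_spec : Claim_equal_get_min_help_seconds := by
  intro t s _
  unfold Spec_get_min_help_seconds get_min_help_seconds get_min_help_seconds_alt
  rw [pvTable_const, pvScan_eq_alt]
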